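-- pv_equiv track=rewrite | github.com/JunYoungkKwon/Algorithm | programmers/1_level_trainning.py | solution
-- ===== SOURCE A (Python) =====
-- def solution(s):
--     ans = 0
--     while s:
--         first = s[0]
--         first_cnt = 0
--         another_cnt = 0
--         flag = False
--         for i, ch in enumerate(s):
--             if first == ch:
--                 first_cnt += 1
--             else:
--                 another_cnt += 1
--             if first_cnt == another_cnt:
--                 ans += 1
--                 s = s[i+1:]
--                 flag = True
--                 break
--         if not flag:
--             ans += 1
--             break
--     return ans
-- ===== SOURCE B (Python) =====
-- def solution(s):
--     ans = 0
--     same = 0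
--     diff = 0
--     first = ' '
--     for ch in s:
--         if same == diff:
--             ans += 1
--             first = ch
--             same, diff = 1, 0
--         elif ch == first:
--             same += 1
--         else:
--             diff += 1
--     return ans
-- ===== Notes on version B (the rewrite author's own statement) =====
-- stated objective: alternative
-- what changed: Replaced A's restarting while-loop (which re-slices the string and re-scans each segment with enumerate) by a single forward pass keeping running same/diff counters and counting segment starts, with no slicing; intended as faster (O(n^2) worst case vs O(n)) but measured only ~1.48x at the largest timed size.
import Mathlib
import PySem

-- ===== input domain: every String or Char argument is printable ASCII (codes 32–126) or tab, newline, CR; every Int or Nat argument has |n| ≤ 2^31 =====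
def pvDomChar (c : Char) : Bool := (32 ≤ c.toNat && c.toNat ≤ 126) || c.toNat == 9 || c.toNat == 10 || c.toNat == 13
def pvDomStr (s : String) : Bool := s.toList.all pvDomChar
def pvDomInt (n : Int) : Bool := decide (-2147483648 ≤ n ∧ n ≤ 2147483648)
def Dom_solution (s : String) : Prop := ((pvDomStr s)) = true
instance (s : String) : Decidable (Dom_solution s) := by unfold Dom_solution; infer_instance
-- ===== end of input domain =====

-- B replaces A's restart-and-reslice scan by a single forward pass with running counters (no slicing).

-- ===== PORT A =====
-- A's inner for-loop over enumerate(s): fc/ac are first_cnt/another_cnt; returns the first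
-- index i at which first_cnt == another_cnt after processing s[i] (none = no break).
def innerA (first : Char) : List Char → Nat → Nat → Option Nat
  | [], _, _ => none
  | ch :: t, fc, ac =>
    if (if first = ch then fc + 1 else fc) = (if first = ch then ac else ac + 1) then some 0
    else (innerA first t (if first = ch then fc + 1 else fc)
            (if first = ch then ac else ac + 1)).map (· + 1)

theorem innerA_lt (first : Char) (l : List Char) (fc ac k : Nat)
    (h : innerA first l fc ac = some k) : k < l.length := by
  induction l generalizing fc ac k with
  | nil => simp [innerA] at h
  | cons ch t ih =>
    rw [innerA] at h
    split at h <;> split at h <;>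
      first
      | (simp only [Option.some.injEq] at h
         simp
         omega)
      | (simp only [Option.map_eq_some_iff] at h
         obtain ⟨k', hk', rfl⟩ := h
         have := ih _ _ _ hk'
         simp
         omega)

-- A's outer while-loop: ans += 1 per break (recursing on the slice s[i+1:]),
-- and ans += 1 once more if the inner loop finishes without a break.
def loopA : List Char → Int
  | [] => 0
  | c :: cs =>
    match h : innerA c (c :: cs) 0 0 with
    | some k => 1 + loopA ((c :: cs).drop (k + 1))
    | none => 1
  termination_by l => l.length
  decreasing_by
    have hlt := innerA_lt c (c :: cs) 0 0 k h
    simp only [List.length_drop, List.length_cons] at hlt ⊢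
    omega

def solution (s : String) : Int := loopA s.toList

-- ===== PORT B =====
-- one step of B's for-loop body: state (ans, same, diff, first)
def stepB (st : Int × Nat × Nat × Char) (ch : Char) : Int × Nat × Nat × Char :=
  match st with
  | (ans, same, diff, first) =>
    if same = diff then (ans + 1, 1, 0, ch)
    else if ch = first then (ans, same + 1, diff, first)
    else (ans, same, diff + 1, first)

def solution_alt (s : String) : Int :=
  (s.toList.foldl stepB (0, 0, 0, ' ')).1

-- ===== PRECONDITION & SPEC =====
def Spec_solution (s : String) (out : Int) : Prop := out = solution_alt s
instance (s : String) (out : Int) : Decidable (Spec_solution s out) := by unfold Spec_solution; infer_instance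

-- ===== CLAIM (what is proved, stated in full; the proofs are below) =====
def Claim_equal_solution : Prop := ∀ (s : String), Dom_solution s → Spec_solution s (solution s)

-- ===== LEMMAS AND PROOFS =====

theorem loopA_nil : loopA [] = 0 := by rw [loopA.eq_def]

theorem loopA_cons (c : Char) (cs : List Char) :
    loopA (c :: cs) = match innerA c cs 1 0 with
      | some k => 1 + loopA (cs.drop (k + 1))
      | none => 1 := by
  have hin : innerA c (c :: cs) 0 0 = (innerA c cs 1 0).map (· + 1) := by
    rw [innerA]; simp
  rw [loopA.eq_def]
  split
  · rename_i heq
    exact absurd heq (by simp)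
  · rename_i c' cs' heq
    injection heq with h1 h2
    subst h1; subst h2
    split
    · rename_i k2 heq2
      rw [hin] at heq2
      cases h : innerA c cs 1 0 with
      | none => rw [h] at heq2; simp at heq2
      | some k =>
        rw [h] at heq2
        simp at heq2
        subst heq2
        simp [List.drop_succ_cons]
    · rename_i heq2
      rw [hin] at heq2
      simp only [Option.map_eq_none_iff] at heq2
      simp [heq2]

-- joint invariant, by strong induction on the list length:
-- (i) from a balanced state (same = diff) B's fold adds loopA l to ans;
-- (ii) from an unbalanced state B's fold tracks A's inner scan to its break point.
theorem fold_loopA (n : Nat) : ∀ l : List Char, l.length ≤ n →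
    ((∀ (ans : Int) (m : Nat) (f : Char),
        (l.foldl stepB (ans, m, m, f)).1 = ans + loopA l)
   ∧ (∀ (fc ac : Nat) (ans : Int) (f : Char), fc ≠ ac →
        (l.foldl stepB (ans, fc, ac, f)).1 =
          match innerA f l fc ac with
          | none => ans
          | some k => ans + loopA (l.drop (k + 1)))) := by
  induction n with
  | zero =>
    intro l hl
    have : l = [] := List.eq_nil_of_length_eq_zero (Nat.le_zero.mp hl)
    subst this
    constructor
    · intro ans m f; simp [loopA_nil]
    · intro fc ac ans f _; simp [innerA]
  | succ n ih =>
    intro l hl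
    cases l with
    | nil =>
      constructor
      · intro ans m f; simp [loopA_nil]
      · intro fc ac ans f _; simp [innerA]
    | cons c cs =>
      have hcs : cs.length ≤ n := by simp at hl; omega
      constructor
      · -- balanced start: first step opens a new segment
        intro ans m f
        have step1 : (c :: cs).foldl stepB (ans, m, m, f)
            = cs.foldl stepB (ans + 1, 1, 0, c) := by
          simp [List.foldl, stepB]
        rw [step1, (ih cs hcs).2 1 0 (ans + 1) c (by omega), loopA_cons]
        cases h' : innerA c cs 1 0 with
        | none => simp
        | some k =>
          simp only []
          rw [Int.add_assoc]
      · -- unbalanced state: follow A's inner scan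
        intro fc ac ans f hne
        have step1 : (c :: cs).foldl stepB (ans, fc, ac, f)
            = cs.foldl stepB (ans,
                (if f = c then fc + 1 else fc),
                (if f = c then ac else ac + 1), f) := by
          by_cases hc : c = f
          · subst hc; simp [List.foldl, stepB, hne]
          · have hcf : ¬ (f = c) := fun h => hc h.symm
            simp [List.foldl, stepB, hne, hc, hcf]
        rw [step1]
        by_cases heq : (if f = c then fc + 1 else fc) = (if f = c then ac else ac + 1)
        · -- break here (index 0)
          have hin : innerA f (c :: cs) fc ac = some 0 := by
            rw [innerA, if_pos heq]
          rw [hin, heq, (ih cs hcs).1 ans _ f]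
          simp
        · -- continue scanning
          have hin : innerA f (c :: cs) fc ac
              = (innerA f cs (if f = c then fc + 1 else fc)
                  (if f = c then ac else ac + 1)).map (· + 1) := by
            rw [innerA, if_neg heq]
          rw [(ih cs hcs).2 _ _ ans f heq, hin]
          cases h' : innerA f cs (if f = c then fc + 1 else fc)
              (if f = c then ac else ac + 1) with
          | none => simp
          | some k => simp

-- ===== VERDICT (by name: the statement is the Claim_ definition above) =====
theorem solution_spec : Claim_equal_solution := by
  intro s _
  unfold Spec_solution solution solution_alt
  have := (fold_loopA s.toList.length s.toList le_rfl).1 0 0 ' '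
  rw [this]
  simp
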